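-- pv_equiv track=rewrite | github.com/ericbannon/cg-oss-license-analyzer | apk-audit/dockerfile_apk_license_check.py | match_packages
-- ===== SOURCE A (Python) =====
-- from collections import defaultdict
-- from typing import Iterable, List, Dict, Any
--
-- def match_packages(
--     packages: Iterable[str],
--     repo_rows: List[Dict[str, str]],
--     repo_filter: str | None = None,
--     arch_filter: str | None = None,
-- ) -> tuple[List[Dict[str, Any]], List[str]]:
--     by_pkg: Dict[str, List[Dict[str, str]]] = defaultdict(list)
--
--     for row in repo_rows:
--         pkg = (row.get("package") or "").strip()
--         if not pkg:
--             continue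
--         if repo_filter and (row.get("repo_base") or "").strip() != repo_filter:
--             continue
--         if arch_filter and (row.get("arch") or "").strip() != arch_filter:
--             continue
--         by_pkg[pkg].append(row)
--
--     matches: List[Dict[str, Any]] = []
--     unmatched: List[str] = []
--
--     for pkg in packages:
--         rows = by_pkg.get(pkg, [])
--         if not rows:
--             unmatched.append(pkg)
--             continue
--
--         for row in rows:
--             matches.append(
--                 {
--                     "package": pkg,
--                     "license": (row.get("license") or "").strip(),
--                     "version": (row.get("version") or "").strip(),
--                     "repo_base": (row.get("repo_base") or "").strip(),
--                     "arch": (row.get("arch") or "").strip(),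
--                     "origin": (row.get("origin") or "").strip(),
--                 }
--             )
--
--     matches.sort(
--         key=lambda r: (
--             r["package"],
--             r["repo_base"],
--             r["arch"],
--             r["version"],
--             r["license"],
--         )
--     )
--     return matches, unmatched
-- ===== SOURCE B (Python) =====
-- def match_packages(packages, repo_rows, repo_filter=None, arch_filter=None):
--     def f(row, k):
--         return (row.get(k) or "").strip()
--
--     # one filtered pass: (stripped package name, row) for every surviving row
--     cand = [
--         (f(r, "package"), r)
--         for r in repo_rows
--         if f(r, "package")
--         and not (repo_filter and f(r, "repo_base") != repo_filter)
--         and not (arch_filter and f(r, "arch") != arch_filter)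
--     ]
--     names = {p for p, _ in cand}
--
--     matches = [
--         {
--             "package": pkg,
--             "license": f(r, "license"),
--             "version": f(r, "version"),
--             "repo_base": f(r, "repo_base"),
--             "arch": f(r, "arch"),
--             "origin": f(r, "origin"),
--         }
--         for pkg in packages
--         for p, r in cand
--         if p == pkg
--     ]
--     unmatched = [pkg for pkg in packages if pkg not in names]
--
--     return (
--         sorted(
--             matches,
--             key=lambda m: (
--                 m["package"],
--                 m["repo_base"],
--                 m["arch"],
--                 m["version"],
--                 m["license"],
--             ),
--         ),
--         unmatched,
--     )
-- ===== Notes on version B (the rewrite author's own statement) =====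
-- stated objective: alternative
-- what changed: B replaces A's dict index and single stateful loop by staged comprehensions: one filtered candidate pass over repo_rows, a name set, then matches and unmatched built as two independent comprehensions over packages, returned via sorted() instead of in-place sort.
import Mathlib
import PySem

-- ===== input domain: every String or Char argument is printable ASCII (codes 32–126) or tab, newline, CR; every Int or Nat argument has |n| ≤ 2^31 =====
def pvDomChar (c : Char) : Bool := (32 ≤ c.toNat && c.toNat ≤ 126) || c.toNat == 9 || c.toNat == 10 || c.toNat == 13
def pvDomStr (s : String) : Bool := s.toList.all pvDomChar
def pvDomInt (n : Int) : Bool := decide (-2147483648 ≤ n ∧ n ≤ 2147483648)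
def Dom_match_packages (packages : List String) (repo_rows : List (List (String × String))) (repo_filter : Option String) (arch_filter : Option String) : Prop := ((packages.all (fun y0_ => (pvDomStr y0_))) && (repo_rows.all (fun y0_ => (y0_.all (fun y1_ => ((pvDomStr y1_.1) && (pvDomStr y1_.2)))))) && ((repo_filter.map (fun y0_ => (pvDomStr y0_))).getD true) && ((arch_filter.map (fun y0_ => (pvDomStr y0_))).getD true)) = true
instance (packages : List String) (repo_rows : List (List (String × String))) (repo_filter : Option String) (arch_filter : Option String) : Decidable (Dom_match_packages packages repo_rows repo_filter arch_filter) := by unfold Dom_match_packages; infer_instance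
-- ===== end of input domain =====

-- B replaces A's dict index + single stateful loop by staged comprehensions over a filtered
-- candidate list (objective: alternative decomposition).

-- shared primitives: row.get(k) with None/"" collapsed by `or ""` (first-match assoc lookup), then .strip()
def mpGetS (row : List (String × String)) (k : String) : String :=
  match row with
  | [] => ""
  | (k', v) :: t => if k' == k then v else mpGetS t k

def mpField (row : List (String × String)) (k : String) : String :=
  PySem.Str.strip (mpGetS row k)

-- `if filt and field != filt: continue` — true means the row is skipped
def mpSkip (filt : Option String) (row : List (String × String)) (k : String) : Bool :=
  match filt with
  | none => false
  | some f => !(f == "") && !(mpField row k == f)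

def mpMk (pkg : String) (row : List (String × String)) : List (String × String) :=
  [("package", pkg), ("license", mpField row "license"), ("version", mpField row "version"),
   ("repo_base", mpField row "repo_base"), ("arch", mpField row "arch"), ("origin", mpField row "origin")]

-- sort key (package, repo_base, arch, version, license): Python tuple comparison of equal-length
-- string tuples = lexicographic List String comparison, and Python str '<' is Lean String '<';
-- both Pythons use the same stable sort (list.sort / sorted), ported as PySem.List.sorted.
def mpKey (r : List (String × String)) : List String :=
  [mpGetS r "package", mpGetS r "repo_base", mpGetS r "arch", mpGetS r "version", mpGetS r "license"]

-- ===== PORT A =====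
def mpStepA (repo_filter arch_filter : Option String)
    (d : PySem.Dict String (List (List (String × String)))) (row : List (String × String)) :
    PySem.Dict String (List (List (String × String))) :=
  let pkg := mpField row "package"
  if pkg == "" then d
  else if mpSkip repo_filter row "repo_base" then d
  else if mpSkip arch_filter row "arch" then d
  else d.modify pkg [] (fun l => l ++ [row])

def match_packages (packages : List String) (repo_rows : List (List (String × String))) (repo_filter : Option String) (arch_filter : Option String) : (List (List (String × String))) × List String :=
  let by_pkg := repo_rows.foldl (mpStepA repo_filter arch_filter) PySem.Dict.empty
  let st := packages.foldl (fun (acc : List (List (String × String)) × List String) pkg =>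
    let rows := by_pkg.getD pkg []
    if rows.isEmpty then (acc.1, acc.2 ++ [pkg])
    else (acc.1 ++ rows.map (mpMk pkg), acc.2)) ([], [])
  (PySem.List.sorted st.1 mpKey false, st.2)

-- ===== PORT B =====
-- the candidate-list comprehension's guard: package nonempty and both filters pass
def mpPass (repo_filter arch_filter : Option String) (row : List (String × String)) : Bool :=
  !(mpField row "package" == "") && !(mpSkip repo_filter row "repo_base")
    && !(mpSkip arch_filter row "arch")

def match_packages_alt (packages : List String) (repo_rows : List (List (String × String))) (repo_filter : Option String) (arch_filter : Option String) : (List (List (String × String))) × List String :=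
  let cand := (repo_rows.filter (mpPass repo_filter arch_filter)).map
    (fun r => (mpField r "package", r))
  let names : PySem.Set String := PySem.Set.ofList (cand.map Prod.fst)
  let ms := packages.flatMap
    (fun pkg => (cand.filter (fun c => c.1 == pkg)).map (fun c => mpMk pkg c.2))
  let unmatched := packages.filter (fun pkg => !(PySem.Set.contains names pkg))
  (PySem.List.sorted ms mpKey false, unmatched)

-- ===== PRECONDITION & SPEC =====
def Spec_match_packages (packages : List String) (repo_rows : List (List (String × String))) (repo_filter : Option String) (arch_filter : Option String) (out : (List (List (String × String))) × List String) : Prop := out = match_packages_alt packages repo_rows repo_filter arch_filter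
instance (packages : List String) (repo_rows : List (List (String × String))) (repo_filter : Option String) (arch_filter : Option String) (out : (List (List (String × String))) × List String) : Decidable (Spec_match_packages packages repo_rows repo_filter arch_filter out) := by unfold Spec_match_packages; infer_instance

-- ===== CLAIM (what is proved, stated in full; the proofs are below) =====
def Claim_equal_match_packages : Prop := ∀ (packages : List String) (repo_rows : List (List (String × String))) (repo_filter : Option String) (arch_filter : Option String), Dom_match_packages packages repo_rows repo_filter arch_filter → Spec_match_packages packages repo_rows repo_filter arch_filter (match_packages packages repo_rows repo_filter arch_filter)

-- ===== LEMMAS AND PROOFS =====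

-- rows passing both filters with nonempty stripped package equal to pkg
def mpHits (rf af : Option String) (pkg : String) (repo_rows : List (List (String × String))) : List (List (String × String)) :=
  repo_rows.filter (fun r => mpPass rf af r && mpField r "package" == pkg)

theorem buildA_getD (rf af : Option String) (pkg : String) (rows : List (List (String × String)))
    (d : PySem.Dict String (List (List (String × String)))) :
    (rows.foldl (mpStepA rf af) d).getD pkg [] = d.getD pkg [] ++ mpHits rf af pkg rows := by
  induction rows generalizing d with
  | nil => simp [mpHits]
  | cons r t ih =>
    rw [List.foldl_cons]
    by_cases h1 : mpField r "package" = ""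
    · have hs : mpStepA rf af d r = d := by simp [mpStepA, h1]
      rw [hs, ih]; simp [mpHits, mpPass, h1]
    · by_cases h2 : mpSkip rf r "repo_base"
      · have hs : mpStepA rf af d r = d := by simp [mpStepA, h1, h2]
        rw [hs, ih]; simp [mpHits, mpPass, h2]
      · by_cases h3 : mpSkip af r "arch"
        · have hs : mpStepA rf af d r = d := by simp [mpStepA, h1, h2, h3]
          rw [hs, ih]; simp [mpHits, mpPass, h3]
        · have hs : mpStepA rf af d r = d.modify (mpField r "package") [] (fun l => l ++ [r]) := by
            simp [mpStepA, h1, h2, h3]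
          rw [hs, ih]
          by_cases h4 : mpField r "package" = pkg
          · have h0 : ¬ pkg = "" := h4 ▸ h1
            simp [mpHits, mpPass, h0, h1, h2, h3, h4]
          · have h4' : ¬ pkg = mpField r "package" := fun h => h4 h.symm
            simp [mpHits, h2, h3, h4, h4', PySem.Dict.getD_modify]

-- A's loop over packages, characterised in one closed form
theorem loopA (by_pkg : PySem.Dict String (List (List (String × String))))
    (packages : List String) (ms : List (List (String × String))) (us : List String) :
    packages.foldl (fun (acc : List (List (String × String)) × List String) pkg =>
      let rows := by_pkg.getD pkg []
      if rows.isEmpty then (acc.1, acc.2 ++ [pkg])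
      else (acc.1 ++ rows.map (mpMk pkg), acc.2)) (ms, us)
    = (ms ++ packages.flatMap (fun pkg => (by_pkg.getD pkg []).map (mpMk pkg)),
       us ++ packages.filter (fun pkg => (by_pkg.getD pkg []).isEmpty)) := by
  induction packages generalizing ms us with
  | nil => simp
  | cons p t ih =>
    rw [List.foldl_cons]
    by_cases h : (by_pkg.getD p []).isEmpty
    · have hnil := List.isEmpty_iff.mp h
      simp only [hnil, List.isEmpty_nil, if_true, ih]
      simp [hnil]
    · simp only [h, Bool.false_eq_true, if_false, ih]
      simp [h]

-- B's candidate filter, reduced to mpHits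
theorem candFilter (rf af : Option String) (pkg : String) (rows : List (List (String × String))) :
    ((rows.filter (mpPass rf af)).map (fun r => (mpField r "package", r))).filter
        (fun c => c.1 == pkg)
      = (mpHits rf af pkg rows).map (fun r => (mpField r "package", r)) := by
  induction rows with
  | nil => rfl
  | cons r t ih =>
    by_cases hp : mpPass rf af r
    · by_cases h4 : mpField r "package" = pkg
      · simp [mpHits, hp, h4, ih]
      · simp [mpHits, hp, h4, ih]
    · simp [mpHits, hp, ih]

-- membership in B's name set = some hit exists
theorem memNames (rf af : Option String) (pkg : String) (rows : List (List (String × String))) :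
    (pkg ∈ ((rows.filter (mpPass rf af)).map
        (fun r => (mpField r "package", r))).map Prod.fst) ↔ mpHits rf af pkg rows ≠ [] := by
  induction rows with
  | nil => simp [mpHits]
  | cons r t ih =>
    rw [mpHits] at ih ⊢
    by_cases hp : mpPass rf af r
    · by_cases h4 : mpField r "package" = pkg
      · simp [List.filter_cons, hp, h4]
      · have h4' : ¬ pkg = mpField r "package" := fun h => h4 h.symm
        simp [List.filter_cons, hp, h4, h4', ih]
        exact ⟨fun ⟨a, ⟨ha, hb⟩, hc⟩ => ⟨a, ha, hb, hc⟩, fun ⟨a, ha, hb, hc⟩ => ⟨a, ⟨ha, hb⟩, hc⟩⟩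
    · simp [List.filter_cons, hp, ih]
      exact ⟨fun ⟨a, ⟨ha, hb⟩, hc⟩ => ⟨a, ha, hb, hc⟩, fun ⟨a, ha, hb, hc⟩ => ⟨a, ⟨ha, hb⟩, hc⟩⟩

-- B's name-set test = A's nonemptiness test on the hit list
theorem namesHit (rf af : Option String) (pkg : String) (rows : List (List (String × String))) :
    PySem.Set.contains
        (PySem.Set.ofList (((rows.filter (mpPass rf af)).map
          (fun r => (mpField r "package", r))).map Prod.fst)) pkg
      = !(mpHits rf af pkg rows).isEmpty := by
  have hc : PySem.Set.contains
      (PySem.Set.ofList (((rows.filter (mpPass rf af)).map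
        (fun r => (mpField r "package", r))).map Prod.fst)) pkg
      = decide (pkg ∈ ((rows.filter (mpPass rf af)).map
        (fun r => (mpField r "package", r))).map Prod.fst) := by
    simp [PySem.Set.contains, List.contains_eq_mem, PySem.Set.mem_ofList]
  have hm := memNames rf af pkg rows
  rw [hc]
  cases hh : mpHits rf af pkg rows with
  | nil =>
    rw [hh] at hm
    simp only [List.isEmpty_nil, Bool.not_true]
    exact decide_eq_false (fun h => hm.mp h rfl)
  | cons a t =>
    rw [hh] at hm
    simp only [List.isEmpty_cons, Bool.not_false]
    exact decide_eq_true (hm.mpr (List.cons_ne_nil a t))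

-- ===== VERDICT (by name: the statement is the Claim_ definition above) =====
theorem match_packages_spec : Claim_equal_match_packages := by
  intro packages repo_rows rf af _
  show match_packages packages repo_rows rf af = match_packages_alt packages repo_rows rf af
  unfold match_packages match_packages_alt
  simp only [loopA, List.nil_append]
  have hget : ∀ pkg, (repo_rows.foldl (mpStepA rf af) PySem.Dict.empty).getD pkg []
      = mpHits rf af pkg repo_rows := by
    intro pkg
    rw [buildA_getD]
    simp [PySem.Dict.getD_empty]
  simp only [Prod.mk.injEq]
  refine ⟨?_, ?_⟩
  · congr 1
    apply List.flatMap_congr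
    intro pkg _
    rw [hget, candFilter, List.map_map]
    rfl
  · apply List.filter_congr
    intro pkg _
    rw [hget, namesHit]
    simp
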